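-- pv_equiv track=rewrite | github.com/SniAssia/Python_projects | algo/probleme de la clique.py | check
-- ===== SOURCE A (Python) =====
-- def voisins(e,node):
--    voisins=[]
--    for i in range(len(e)):
--       if e[i][0]==node  :
--          voisins.append(e[i][1])
--
--       elif e[i][1]==node  :
--          voisins.append(e[i][0])
--
--    return voisins
--
-- def check(sous_graphe,e):
--     vis=[]
--     vis.append(sous_graphe[0])
--     sommet = sous_graphe[0]
--     for i in range(1,len(sous_graphe)):
--         if sous_graphe[i] in  voisins(e , sommet):
--             vis.append(sous_graphe[i])
--             sommet = sous_graphe[i]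
--     if len(vis) != len(sous_graphe):
--         return 0
--     else :
--         return 1
-- ===== SOURCE B (Python) =====
-- def check(sous_graphe, e):
--     edges = set()
--     for edge in e:
--         a, b = edge[0], edge[1]
--         edges.add((a, b))
--         edges.add((b, a))
--     ok = all(p in edges for p in zip(sous_graphe, sous_graphe[1:]))
--     return 1 if ok else 0
-- ===== Notes on version B (the rewrite author's own statement) =====
-- stated objective: faster
-- what changed: B builds a set of directed edge pairs once and tests each consecutive pair of sous_graphe directly via zip, discarding A's vis accumulator, advancing sommet state and per-step voisins() rescan of the whole edge list; Pre_ excludes the empty subgraph (A raises IndexError) and edge lists with an entry of fewer than two endpoints (A raises there except when it never reads e).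
-- outside the precondition, e.g. on check([5], [[]]): A returns 1, B raises IndexError
import Mathlib
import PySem

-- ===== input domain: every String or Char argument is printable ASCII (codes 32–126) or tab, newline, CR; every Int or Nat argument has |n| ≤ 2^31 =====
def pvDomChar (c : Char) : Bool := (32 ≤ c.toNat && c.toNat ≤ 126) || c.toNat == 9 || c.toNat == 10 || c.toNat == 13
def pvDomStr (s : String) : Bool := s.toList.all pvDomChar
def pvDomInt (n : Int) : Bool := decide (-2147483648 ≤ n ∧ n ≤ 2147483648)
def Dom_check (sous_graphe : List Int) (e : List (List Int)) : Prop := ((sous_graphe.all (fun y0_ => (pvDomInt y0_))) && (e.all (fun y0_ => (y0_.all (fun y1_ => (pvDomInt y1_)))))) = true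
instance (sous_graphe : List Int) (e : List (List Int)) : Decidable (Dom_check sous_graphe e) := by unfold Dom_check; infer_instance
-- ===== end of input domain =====

-- B builds the edge set once and tests each consecutive pair directly (via zip),
-- discarding A's vis accumulator and advancing sommet state (objective: faster, one pass over e).


-- ===== PORT A =====
def voisins (e : List (List Int)) (node : Int) : List Int :=
  e.foldl (fun vs ei =>
    if PySem.List.pyGetD ei 0 0 = node then vs ++ [PySem.List.pyGetD ei 1 0]
    else if PySem.List.pyGetD ei 1 0 = node then vs ++ [PySem.List.pyGetD ei 0 0]
    else vs) []

-- the body of A's loop: try to extend the visited chain from the current sommet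
def stepA (e : List (List Int)) (p : List Int × Int) (x : Int) : List Int × Int :=
  if (voisins e p.2).contains x then (p.1 ++ [x], x) else p

def check (sous_graphe : List Int) (e : List (List Int)) : Int :=
  if ((PySem.List.pyRange 1 (sous_graphe.length : Int) 1).foldl
        (fun p i => stepA e p (PySem.List.pyGetD sous_graphe i 0))
        ([PySem.List.pyGetD sous_graphe 0 0], PySem.List.pyGetD sous_graphe 0 0)).1.length
      ≠ sous_graphe.length
  then 0 else 1

-- ===== PORT B =====
def edgeSet (e : List (List Int)) : PySem.Set (Int × Int) :=
  e.foldl (fun s edge =>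
    PySem.Set.add
      (PySem.Set.add s (PySem.List.pyGetD edge 0 0, PySem.List.pyGetD edge 1 0))
      (PySem.List.pyGetD edge 1 0, PySem.List.pyGetD edge 0 0))
    PySem.Set.empty

def check_alt (sous_graphe : List Int) (e : List (List Int)) : Int :=
  if (sous_graphe.zip (PySem.List.slice sous_graphe (some 1) none)).all
      (fun ab => PySem.Set.contains (edgeSet e) ab)
  then 1 else 0

-- ===== PRECONDITION & SPEC =====
-- Pre_ excludes the empty subgraph (A raises IndexError on sous_graphe[0]) and ragged edge
-- lists whose entries have fewer than two endpoints (A raises there too, except when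
-- sous_graphe is a singleton, where A never reads e; B always reads both endpoints of every edge).
def Pre_check (sous_graphe : List Int) (e : List (List Int)) : Prop :=
  sous_graphe ≠ [] ∧ ∀ l ∈ e, 2 ≤ l.length
instance (sous_graphe : List Int) (e : List (List Int)) : Decidable (Pre_check sous_graphe e) := by unfold Pre_check; infer_instance
def pvWitness_check : List Int × List (List Int) := ([1, 2], [[1, 2]])

def Spec_check (sous_graphe : List Int) (e : List (List Int)) (out : Int) : Prop := out = check_alt sous_graphe e
instance (sous_graphe : List Int) (e : List (List Int)) (out : Int) : Decidable (Spec_check sous_graphe e out) := by unfold Spec_check; infer_instance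

-- ===== CLAIM (what is proved, stated in full; the proofs are below) =====
def Claim_equal_check : Prop := ∀ (sous_graphe : List Int) (e : List (List Int)), Dom_check sous_graphe e → Pre_check sous_graphe e → Spec_check sous_graphe e (check sous_graphe e)

-- ===== LEMMAS AND PROOFS =====

-- membership in A's neighbour list
theorem mem_voisins (e : List (List Int)) (x y : Int) :
    y ∈ voisins e x ↔ ∃ l ∈ e,
      (PySem.List.pyGetD l 0 0 = x ∧ y = PySem.List.pyGetD l 1 0) ∨
      (PySem.List.pyGetD l 0 0 ≠ x ∧ PySem.List.pyGetD l 1 0 = x ∧ y = PySem.List.pyGetD l 0 0) := by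
  have h : voisins e x = [] ++ e.flatMap (fun l =>
      if PySem.List.pyGetD l 0 0 = x then [PySem.List.pyGetD l 1 0]
      else if PySem.List.pyGetD l 1 0 = x then [PySem.List.pyGetD l 0 0]
      else []) := by
    rw [← PySem.List.foldl_append_eq_flatMap]
    unfold voisins
    congr 1
    funext vs l
    split_ifs <;> simp
  rw [h]
  simp only [List.nil_append, List.mem_flatMap]
  constructor
  · rintro ⟨l, hl, hy⟩
    refine ⟨l, hl, ?_⟩
    split_ifs at hy with h1 h2
    · simp at hy; exact Or.inl ⟨h1, hy⟩
    · simp at hy; exact Or.inr ⟨h1, h2, hy⟩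
    · simp at hy
  · rintro ⟨l, hl, hy⟩
    refine ⟨l, hl, ?_⟩
    rcases hy with ⟨h1, hy⟩ | ⟨h1, h2, hy⟩
    · simp [h1, hy]
    · simp [h1, h2, hy]

-- membership in B's edge set
theorem mem_edgeSet_aux (e : List (List Int)) :
    ∀ (s : PySem.Set (Int × Int)) (p : Int × Int),
      p ∈ e.foldl (fun s edge =>
        PySem.Set.add
          (PySem.Set.add s (PySem.List.pyGetD edge 0 0, PySem.List.pyGetD edge 1 0))
          (PySem.List.pyGetD edge 1 0, PySem.List.pyGetD edge 0 0)) s ↔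
      p ∈ s ∨ ∃ l ∈ e,
        p = (PySem.List.pyGetD l 0 0, PySem.List.pyGetD l 1 0) ∨
        p = (PySem.List.pyGetD l 1 0, PySem.List.pyGetD l 0 0) := by
  induction e with
  | nil => simp
  | cons hd tl ih =>
    intro s p
    simp only [List.foldl_cons, ih, PySem.Set.mem_add, List.mem_cons]
    constructor
    · rintro (((h | h) | h) | h)
      · exact Or.inl h
      · exact Or.inr ⟨hd, Or.inl rfl, Or.inl h⟩
      · exact Or.inr ⟨hd, Or.inl rfl, Or.inr h⟩
      · obtain ⟨l, hl, hp⟩ := h; exact Or.inr ⟨l, Or.inr hl, hp⟩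
    · rintro (h | ⟨l, hl | hl, hp⟩)
      · exact Or.inl (Or.inl (Or.inl h))
      · subst hl; rcases hp with hp | hp
        · exact Or.inl (Or.inl (Or.inr hp))
        · exact Or.inl (Or.inr hp)
      · exact Or.inr ⟨l, hl, hp⟩

theorem mem_edgeSet (e : List (List Int)) (p : Int × Int) :
    p ∈ edgeSet e ↔ ∃ l ∈ e,
      p = (PySem.List.pyGetD l 0 0, PySem.List.pyGetD l 1 0) ∨
      p = (PySem.List.pyGetD l 1 0, PySem.List.pyGetD l 0 0) := by
  unfold edgeSet
  rw [mem_edgeSet_aux]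
  simp [PySem.Set.empty]

-- A's adjacency test and B's coincide
theorem adj_eq (e : List (List Int)) (x y : Int) :
    (voisins e x).contains y = PySem.Set.contains (edgeSet e) (x, y) := by
  have h1 : (voisins e x).contains y = true ↔ y ∈ voisins e x := List.contains_iff_mem
  have h2 : PySem.Set.contains (edgeSet e) (x, y) = true ↔ (x, y) ∈ edgeSet e :=
    PySem.Set.contains_iff _ _
  have key : y ∈ voisins e x ↔ (x, y) ∈ edgeSet e := by
    rw [mem_voisins, mem_edgeSet]
    constructor
    · rintro ⟨l, hl, ⟨ha, hy⟩ | ⟨ha, hb, hy⟩⟩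
      · exact ⟨l, hl, Or.inl (by simp [ha, hy])⟩
      · exact ⟨l, hl, Or.inr (by simp [hb, hy])⟩
    · rintro ⟨l, hl, hp | hp⟩
      · obtain ⟨ha, hy⟩ := Prod.mk.injEq .. ▸ hp
        exact ⟨l, hl, Or.inl ⟨ha.symm, hy⟩⟩
      · simp only [Prod.mk.injEq] at hp
        obtain ⟨hb, hy⟩ := hp
        by_cases ha : PySem.List.pyGetD l 0 0 = x
        · exact ⟨l, hl, Or.inl ⟨ha, by omega⟩⟩
        · exact ⟨l, hl, Or.inr ⟨ha, hb.symm, hy⟩⟩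
  cases hv : (voisins e x).contains y <;> cases hs : PySem.Set.contains (edgeSet e) (x, y) <;>
    simp_all

-- A's fold can only add one visited vertex per step
theorem foldA_len_le (e : List (List Int)) :
    ∀ (t : List Int) (vis : List Int) (s : Int),
      (t.foldl (stepA e) (vis, s)).1.length ≤ vis.length + t.length := by
  intro t
  induction t with
  | nil => simp
  | cons x t' ih =>
    intro vis s
    simp only [List.foldl_cons, stepA]
    split_ifs with h
    · have h2 := ih (vis ++ [x]) x
      simp only [List.length_append, List.length_cons, List.length_nil] at h2 ⊢
      omega
    · have h2 := ih vis s
      simp only [List.length_cons]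
      omega

-- A's fold fills vis completely iff every consecutive pair is adjacent
theorem foldA_len_eq_iff (e : List (List Int)) :
    ∀ (t : List Int) (vis : List Int) (s : Int),
      ((t.foldl (stepA e) (vis, s)).1.length = vis.length + t.length ↔
        ((s :: t).zip t).all (fun ab => (voisins e ab.1).contains ab.2) = true) := by
  intro t
  induction t with
  | nil => simp
  | cons x t' ih =>
    intro vis s
    simp only [List.foldl_cons, stepA, List.zip_cons_cons, List.all_cons, Bool.and_eq_true,
      List.length_cons]
    split_ifs with h
    · have hrec := ih (vis ++ [x]) x
      simp only [List.length_append, List.length_singleton] at hrec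
      constructor
      · intro hl
        exact ⟨h, hrec.mp (by omega)⟩
      · rintro ⟨-, hall⟩
        have := hrec.mpr hall
        omega
    · constructor
      · intro hl
        exfalso
        have hle := foldA_len_le e t' vis s
        omega
      · rintro ⟨hx, -⟩
        exact absurd hx h

-- ===== VERDICT (by name: the statement is the Claim_ definition above) =====
theorem check_spec : Claim_equal_check := by
  intro sg e _ hpre
  obtain ⟨hne, -⟩ := hpre
  obtain ⟨s0, rest, rfl⟩ : ∃ a t, sg = a :: t := by
    cases sg with
    | nil => exact absurd rfl hne
    | cons a t => exact ⟨a, t, rfl⟩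
  unfold Spec_check check check_alt
  rw [PySem.List.foldl_pyRange_pyGetD' (s0 :: rest) 0 (stepA e) _ (by norm_num : (0:Int) ≤ 1)]
  simp only [PySem.List.pyGetD_zero_cons, PySem.List.slice_from_one, List.tail_cons,
    Int.toNat_one, List.drop_one]
  have hiff := foldA_len_eq_iff e rest [s0] s0
  have hle := foldA_len_le e rest [s0] s0
  have hadj : (fun ab : Int × Int => (voisins e ab.1).contains ab.2) =
      (fun ab : Int × Int => PySem.Set.contains (edgeSet e) ab) := by
    funext ab; exact adj_eq e ab.1 ab.2
  rw [hadj] at hiff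
  simp only [List.length_singleton] at hiff hle
  by_cases hall : ((s0 :: rest).zip rest).all
      (fun ab => PySem.Set.contains (edgeSet e) ab) = true
  · have hlen := hiff.mpr hall
    simp only [List.length_cons, hall, if_true]
    rw [if_neg (by omega)]
  · have hlen : ¬ (rest.foldl (stepA e) ([s0], s0)).1.length = 1 + rest.length := fun hc =>
      hall (hiff.mp hc)
    simp only [List.length_cons]
    rw [if_neg hall]
    rw [if_pos (show (List.foldl (stepA e) ([s0], s0) rest).1.length ≠ rest.length + 1 by omega)]
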